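-- pv_equiv track=rewrite | github.com/cmelab/planckton | planckton/utils/rigid.py | _check_rings
-- ===== SOURCE A (Python) =====
-- def _check_rings(rings):
--     # if not all rings are disjoint, then some must still share particles
--     connected = all(
--         [
--             ringi.isdisjoint(ringj)
--             for i, ringi in enumerate(rings[:-1])
--             for ringj in rings[i + 1 :]
--         ]
--     )
--     if not connected:
--         new_rings = [
--             set(sorted(ringi.union(ringj)))
--             for i, ringi in enumerate(rings[:-1])
--             for ringj in rings[i + 1 :]
--             if not ringi.isdisjoint(ringj)
--         ]
--
--         # this ends up adding each connected ring twice, so the next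
--         # section fixes that
--         conjugated = []
--         for i in new_rings:
--             if i not in conjugated:
--                 conjugated.append(i)
--
--         # Add any disjoint rings that are already fully connected
--         for i in rings:
--             disjoint = [i.isdisjoint(j) for j in conjugated]
--             if all(disjoint):
--                 if sorted(i) not in conjugated:
--                     conjugated.append(set(sorted(i)))
--     else:
--         conjugated = rings
--     return conjugated, connected
-- ===== SOURCE B (Python) =====
-- def _check_rings(rings):
--     # particle -> ordered list of indices of the rings that contain it
--     where = {}
--     for idx, ring in enumerate(rings):
--         for p in ring:
--             where.setdefault(p, []).append(idx)
--     # overlapping ring-index pairs (i < j), deduplicated by a set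
--     pairs = set()
--     for idxs in where.values():
--         for a in range(len(idxs)):
--             for b in range(a + 1, len(idxs)):
--                 pairs.add((idxs[a], idxs[b]))
--     if not pairs:
--         return rings, True
--     conjugated = []
--     seen = set()
--     members = set()
--     for i, j in sorted(pairs):
--         u = tuple(sorted(rings[i] | rings[j]))
--         if u not in seen:
--             seen.add(u)
--             conjugated.append(set(u))
--             members.update(u)
--     for ring in rings:
--         if members.isdisjoint(ring):
--             conjugated.append(set(sorted(ring)))
--             members.update(ring)
--     return conjugated, False
-- ===== Notes on version B (the rewrite author's own statement) =====
-- stated objective: faster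
-- what changed: B replaces A's all-pairs disjointness scans with a particle-to-ring-indices dictionary from which the overlapping index pairs are read off (then sorted), dedups merged rings with a hash set of canonical sorted tuples instead of a quadratic list-membership loop, and replaces the inner scan over conjugated in the final disjointness pass with one maintained set of already-collected particles.
import Mathlib
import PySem

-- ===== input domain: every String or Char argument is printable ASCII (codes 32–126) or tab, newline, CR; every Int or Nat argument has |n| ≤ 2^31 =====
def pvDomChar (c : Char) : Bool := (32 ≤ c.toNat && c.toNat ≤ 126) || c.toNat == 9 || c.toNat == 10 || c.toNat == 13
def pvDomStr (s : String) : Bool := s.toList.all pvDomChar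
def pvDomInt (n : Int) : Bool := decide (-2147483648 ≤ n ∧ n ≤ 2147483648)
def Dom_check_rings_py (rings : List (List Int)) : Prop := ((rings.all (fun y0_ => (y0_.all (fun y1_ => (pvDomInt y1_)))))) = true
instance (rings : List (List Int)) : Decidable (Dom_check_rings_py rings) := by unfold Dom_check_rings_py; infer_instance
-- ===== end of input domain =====

-- B finds the overlapping ring pairs through a particle→ring-index dictionary, dedups merged
-- rings with a set of canonical sorted tuples, and keeps one set of already-collected particles
-- for the final disjointness pass, instead of A's all-pairs scans and list-membership dedup.

-- ===== PORT A =====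
def check_rings_py (rings : List (List Int)) : List (List Int) × Bool :=
  let connected :=
    ((PySem.List.enumerate (PySem.List.slice rings none (some (-1))) 0).flatMap
      (fun p => (PySem.List.slice rings (some (p.1 + 1)) none).map
        (fun ringj => PySem.Set.isdisjoint p.2 ringj))).all (fun b => b)
  if !connected then
    let new_rings :=
      (PySem.List.enumerate (PySem.List.slice rings none (some (-1))) 0).flatMap
        (fun p => ((PySem.List.slice rings (some (p.1 + 1)) none).filter
            (fun ringj => !(PySem.Set.isdisjoint p.2 ringj))).map
          (fun ringj => PySem.Set.ofList (PySem.List.sorted (PySem.Set.union p.2 ringj) (fun x => x) false)))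
    let conjugated :=
      new_rings.foldl (fun acc i => if acc.any (fun c => PySem.Set.equal c i) then acc else acc ++ [i]) []
    let conjugated2 :=
      rings.foldl (fun acc i =>
        let disjoint := acc.map (fun j => PySem.Set.isdisjoint i j)
        if disjoint.all (fun b => b) then
          -- Python's 'if sorted(i) not in conjugated' compares a list with sets, so it is always True
          acc ++ [PySem.Set.ofList (PySem.List.sorted i (fun x => x) false)]
        else acc) conjugated
    (conjugated2, connected)
  else (rings, connected)

-- ===== PORT B =====
def check_rings_py_alt (rings : List (List Int)) : List (List Int) × Bool :=
  let whereD : PySem.Dict Int (List Int) :=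
    (PySem.List.enumerate rings 0).foldl
      (fun d q => q.2.foldl (fun d' p => d'.modify p [] (fun l => l ++ [q.1])) d)
      PySem.Dict.empty
  let pairs : PySem.Set (Int × Int) :=
    whereD.values.foldl
      (fun s idxs =>
        (PySem.List.pyRange 0 (PySem.List.len idxs) 1).foldl
          (fun s' a =>
            (PySem.List.pyRange (a + 1) (PySem.List.len idxs) 1).foldl
              (fun s'' b => PySem.Set.add s'' (PySem.List.pyGetD idxs a 0, PySem.List.pyGetD idxs b 0))
              s')
          s)
      PySem.Set.empty
  if pairs.isEmpty then (rings, true)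
  else
    let st :=
      (PySem.List.sorted2 pairs (fun pr => pr.1) (fun pr => pr.2) false).foldl
        (fun (st : List (List Int) × PySem.Set (List Int) × PySem.Set Int) pr =>
          let u := PySem.List.sorted
              (PySem.Set.union (PySem.List.pyGetD rings pr.1 []) (PySem.List.pyGetD rings pr.2 []))
              (fun x => x) false
          if PySem.Set.contains st.2.1 u then st
          else (st.1 ++ [PySem.Set.ofList u], PySem.Set.add st.2.1 u, PySem.Set.update st.2.2 u))
        ([], PySem.Set.empty, PySem.Set.empty)
    let fin :=
      rings.foldl
        (fun (st : List (List Int) × PySem.Set Int) ring =>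
          if PySem.Set.isdisjoint st.2 ring then
            (st.1 ++ [PySem.Set.ofList (PySem.List.sorted ring (fun x => x) false)], PySem.Set.update st.2 ring)
          else st)
        (st.1, st.2.2)
    (fin.1, false)

-- ===== PRECONDITION & SPEC =====
-- Pre_ is the representation invariant of the 'list[set[int]]' argument: each ring is the list of
-- its set's DISTINCT elements (a Python set can hold no duplicates), so it excludes no actual input of A.
def Pre_check_rings_py (rings : List (List Int)) : Prop := ∀ r ∈ rings, r.Nodup
instance (rings : List (List Int)) : Decidable (Pre_check_rings_py rings) := by unfold Pre_check_rings_py; infer_instance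
def pvWitness_check_rings_py : List (List Int) := [[1, 2], [2, 3], [5]]
def Spec_check_rings_py (rings : List (List Int)) (out : List (List Int) × Bool) : Prop := out = check_rings_py_alt rings
instance (rings : List (List Int)) (out : List (List Int) × Bool) : Decidable (Spec_check_rings_py rings out) := by unfold Spec_check_rings_py; infer_instance

-- ===== CLAIM (what is proved, stated in full; the proofs are below) =====
def Claim_equal_check_rings_py : Prop := ∀ (rings : List (List Int)), Dom_check_rings_py rings → Pre_check_rings_py rings → Spec_check_rings_py rings (check_rings_py rings)

-- ===== LEMMAS AND PROOFS =====

-- A-side normal forms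
def pvConn (rings : List (List Int)) : Bool :=
  ((PySem.List.enumerate (PySem.List.slice rings none (some (-1))) 0).flatMap
    (fun p => (PySem.List.slice rings (some (p.1 + 1)) none).map
      (fun ringj => PySem.Set.isdisjoint p.2 ringj))).all (fun b => b)

def pvNew (rings : List (List Int)) : List (List Int) :=
  (PySem.List.enumerate (PySem.List.slice rings none (some (-1))) 0).flatMap
    (fun p => ((PySem.List.slice rings (some (p.1 + 1)) none).filter
        (fun ringj => !(PySem.Set.isdisjoint p.2 ringj))).map
      (fun ringj => PySem.Set.ofList (PySem.List.sorted (PySem.Set.union p.2 ringj) (fun x => x) false)))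

def pvStepD (acc : List (List Int)) (i : List Int) : List (List Int) :=
  if acc.any (fun c => PySem.Set.equal c i) then acc else acc ++ [i]

def pvStepE (acc : List (List Int)) (i : List Int) : List (List Int) :=
  let disjoint := acc.map (fun j => PySem.Set.isdisjoint i j)
  if disjoint.all (fun b => b) then
    acc ++ [PySem.Set.ofList (PySem.List.sorted i (fun x => x) false)]
  else acc

-- B-side normal forms
def pvWhere (rings : List (List Int)) : PySem.Dict Int (List Int) :=
  (PySem.List.enumerate rings 0).foldl
    (fun d q => q.2.foldl (fun d' p => d'.modify p [] (fun l => l ++ [q.1])) d)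
    PySem.Dict.empty

def pvPairs (rings : List (List Int)) : PySem.Set (Int × Int) :=
  (pvWhere rings).values.foldl
    (fun s idxs =>
      (PySem.List.pyRange 0 (PySem.List.len idxs) 1).foldl
        (fun s' a =>
          (PySem.List.pyRange (a + 1) (PySem.List.len idxs) 1).foldl
            (fun s'' b => PySem.Set.add s'' (PySem.List.pyGetD idxs a 0, PySem.List.pyGetD idxs b 0))
            s')
        s)
    PySem.Set.empty

def pvStepB (rings : List (List Int))
    (st : List (List Int) × PySem.Set (List Int) × PySem.Set Int) (pr : Int × Int) :
    List (List Int) × PySem.Set (List Int) × PySem.Set Int :=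
  let u := PySem.List.sorted
      (PySem.Set.union (PySem.List.pyGetD rings pr.1 []) (PySem.List.pyGetD rings pr.2 []))
      (fun x => x) false
  if PySem.Set.contains st.2.1 u then st
  else (st.1 ++ [PySem.Set.ofList u], PySem.Set.add st.2.1 u, PySem.Set.update st.2.2 u)

def pvMerge (rings : List (List Int)) : List (List Int) × PySem.Set (List Int) × PySem.Set Int :=
  (PySem.List.sorted2 (pvPairs rings) (fun pr => pr.1) (fun pr => pr.2) false).foldl
    (pvStepB rings) ([], PySem.Set.empty, PySem.Set.empty)

def pvStepC (st : List (List Int) × PySem.Set Int) (ring : List Int) :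
    List (List Int) × PySem.Set Int :=
  if PySem.Set.isdisjoint st.2 ring then
    (st.1 ++ [PySem.Set.ofList (PySem.List.sorted ring (fun x => x) false)], PySem.Set.update st.2 ring)
  else st

theorem pv_a_eq (rings : List (List Int)) :
    check_rings_py rings =
      if !pvConn rings then
        (rings.foldl pvStepE ((pvNew rings).foldl pvStepD []), pvConn rings)
      else (rings, pvConn rings) := rfl

theorem pv_b_eq (rings : List (List Int)) :
    check_rings_py_alt rings =
      if (pvPairs rings).isEmpty then (rings, true)
      else ((rings.foldl pvStepC ((pvMerge rings).1, (pvMerge rings).2.2)).1, false) := rfl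
-- the overlapping index pairs (i, j), i < j, in lexicographic order
def pvOvb (rings : List (List Int)) (i j : Nat) : Bool :=
  !(PySem.Set.isdisjoint (rings.getD i []) (rings.getD j []))

def pvOvp (rings : List (List Int)) : List (Int × Int) :=
  (List.range rings.length).flatMap (fun i =>
    (((List.range rings.length).filter (fun j => decide (i < j) && pvOvb rings i j)).map
      (fun (j : Nat) => ((i : Int), (j : Int)))))

-- the canonical merged ring of a pair
def pvU (rings : List (List Int)) (pr : Int × Int) : List Int :=
  PySem.List.sorted
    (PySem.Set.union (PySem.List.pyGetD rings pr.1 []) (PySem.List.pyGetD rings pr.2 []))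
    (fun x => x) false

-- particle → list of indices of the rings containing it
def pvOcc (rings : List (List Int)) (p : Int) : List Int :=
  ((PySem.List.enumerate rings 0).filter (fun q => decide (p ∈ q.2))).map (fun q => q.1)

def pvPlist (rings : List (List Int)) : List (Int × Int) :=
  (PySem.List.enumerate rings 0).flatMap (fun q => q.2.map (fun x => (x, q.1)))

-- generic fold facts
theorem pv_mem_foldl_iff {β γ : Type} (g : List γ → β → List γ) (Q : β → γ → Prop)
    (hg : ∀ s b x, x ∈ g s b ↔ x ∈ s ∨ Q b x) (l : List β) (s : List γ) (x : γ) :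
    x ∈ l.foldl g s ↔ x ∈ s ∨ ∃ b ∈ l, Q b x := by
  induction l generalizing s with
  | nil => simp
  | cons b t ih => simp [ih, hg]; tauto

theorem pv_nodup_foldl {β γ : Type} (g : List γ → β → List γ)
    (hg : ∀ s b, s.Nodup → (g s b).Nodup) (l : List β) (s : List γ) (hs : s.Nodup) :
    (l.foldl g s).Nodup := by
  induction l generalizing s with
  | nil => exact hs
  | cons b t ih => exact ih _ (hg _ _ hs)

theorem pv_map_filter_eq_flatMap {α β : Type} (f : α → β) (p : α → Bool) (l : List α) :
    (l.filter p).map f = l.flatMap (fun a => if p a then [f a] else []) := by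
  induction l with
  | nil => rfl
  | cons a t ih => by_cases h : p a <;> simp [h, ih]

theorem pv_flat_single (l : List Int) (hnd : l.Nodup) (p v : Int) :
    l.flatMap (fun x => if x == p then [v] else []) = if p ∈ l then [v] else [] := by
  induction l with
  | nil => simp
  | cons a t ih =>
    rw [List.nodup_cons] at hnd
    rw [List.flatMap_cons, ih hnd.2]
    by_cases hap : a = p
    · have hpt : p ∉ t := hap ▸ hnd.1
      simp [hap, hpt, List.mem_cons]
    · have hpa : ¬(p = a) := fun h => hap h.symm
      by_cases hpt : p ∈ t
      · simp [hap, hpt, List.mem_cons]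
      · simp [hap, hpt, hpa, List.mem_cons]

theorem pv_pairwise_lt_nodup (l : List Int) (h : l.Pairwise (· < ·)) : l.Nodup :=
  h.imp (fun hab => ne_of_lt hab)

theorem pv_strict_eq (c u : List Int) (hc : c.Pairwise (· < ·)) (hu : u.Pairwise (· < ·))
    (h : ∀ x, x ∈ c ↔ x ∈ u) : c = u := by
  have hperm : u.Perm c :=
    (List.perm_ext_iff_of_nodup (pv_pairwise_lt_nodup u hu) (pv_pairwise_lt_nodup c hc)).mpr
      (fun a => (h a).symm)
  have h1 : PySem.List.sorted c (fun x => x) = u :=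
    PySem.List.sorted_eq_of_perm_of_pairwise_lt c u (fun x => x) hperm hu
  have h2 : PySem.List.sorted c (fun x => x) = c :=
    PySem.List.sorted_eq_self_of_pairwise c (fun x => x) (hc.imp (fun hab => le_of_lt hab))
  rw [← h1, h2]

theorem pv_getD (rings : List (List Int)) (i : Nat) (h : i < rings.length) :
    rings.getD i [] = rings[i] := by
  simp [List.getD_eq_getElem?_getD, h]

-- facts about pvOvp
theorem pv_mem_ovp (rings : List (List Int)) (x : Int × Int) :
    x ∈ pvOvp rings ↔ ∃ i j : Nat, i < j ∧ j < rings.length ∧ pvOvb rings i j = true ∧ x = ((i : Int), (j : Int)) := by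
  simp only [pvOvp, List.mem_flatMap, List.mem_map]
  constructor
  · rintro ⟨i, hi, j, hj, rfl⟩
    rw [List.mem_filter, List.mem_range] at hj
    obtain ⟨hjn, h2⟩ := hj
    rw [Bool.and_eq_true, decide_eq_true_eq] at h2
    exact ⟨i, j, h2.1, hjn, h2.2, rfl⟩
  · rintro ⟨i, j, hij, hjn, hov, rfl⟩
    exact ⟨i, List.mem_range.mpr (lt_trans hij hjn), j,
      List.mem_filter.mpr ⟨List.mem_range.mpr hjn, by simp [hij, hov]⟩, rfl⟩

theorem pv_ovp_pairwise (rings : List (List Int)) :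
    (pvOvp rings).Pairwise (fun a b => a.1 < b.1 ∨ (a.1 = b.1 ∧ a.2 < b.2)) := by
  apply List.pairwise_flatMap.mpr
  constructor
  · intro i _
    rw [List.pairwise_map]
    refine (List.Pairwise.filter _ List.pairwise_lt_range).imp ?_
    intro a b hab
    right
    exact ⟨rfl, (by exact_mod_cast hab : ((a : Int)) < ((b : Int)))⟩
  · refine List.pairwise_lt_range.imp ?_
    intro i1 i2 h12 x hx y hy
    simp only [List.mem_map] at hx hy
    obtain ⟨j1, _, rfl⟩ := hx
    obtain ⟨j2, _, rfl⟩ := hy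
    left
    exact (by exact_mod_cast h12 : ((i1 : Int)) < ((i2 : Int)))

theorem pv_ovp_nodup (rings : List (List Int)) : (pvOvp rings).Nodup := by
  refine (pv_ovp_pairwise rings).imp ?_
  rintro ⟨a1, a2⟩ ⟨b1, b2⟩ h
  rcases h with h | ⟨h1, h2⟩ <;> simp_all <;> omega

theorem pv_ovb_iff (rings : List (List Int)) (i j : Nat) :
    pvOvb rings i j = true ↔ ∃ p, p ∈ rings.getD i [] ∧ p ∈ rings.getD j [] := by
  rw [pvOvb, Bool.not_eq_true']
  constructor
  · intro h
    by_contra hc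
    push Not at hc
    have ht : PySem.Set.isdisjoint (rings.getD i []) (rings.getD j []) = true :=
      (PySem.Set.isdisjoint_iff _ _).mpr (fun x hx => hc x hx)
    exact Bool.noConfusion (ht.symm.trans h)
  · rintro ⟨p, hp1, hp2⟩
    cases h : PySem.Set.isdisjoint (rings.getD i []) (rings.getD j []) with
    | false => rfl
    | true => exact absurd hp2 ((PySem.Set.isdisjoint_iff _ _).mp h p hp1)

-- facts about the dictionary index
theorem pv_where_eq_foldl (rings : List (List Int)) :
    pvWhere rings =
      (pvPlist rings).foldl (fun d pr => d.modify pr.1 [] (fun l => l ++ [pr.2])) PySem.Dict.empty := by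
  rw [pvPlist, List.foldl_flatMap]
  simp only [pvWhere, List.foldl_map]

theorem pv_where_getD (rings : List (List Int)) (hnd : ∀ r ∈ rings, r.Nodup) (p : Int) :
    (pvWhere rings).getD p [] = pvOcc rings p := by
  rw [pv_where_eq_foldl, PySem.Dict.getD_foldl_modify_append]
  have hemp : (PySem.Dict.empty : PySem.Dict Int (List Int)).getD p [] = [] := by
    simp [PySem.Dict.getD_empty]
  rw [hemp, List.nil_append]
  rw [pv_map_filter_eq_flatMap, pvOcc, pv_map_filter_eq_flatMap]
  rw [pvPlist, List.flatMap_assoc]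
  apply List.flatMap_congr
  intro q hq
  have hqnd : q.2.Nodup := by
    obtain ⟨k, hk, hq2⟩ := (PySem.List.mem_enumerate_iff rings 0 q).mp hq
    rw [hq2]
    exact hnd _ (List.getElem_mem hk)
  rw [List.flatMap_map]
  have := pv_flat_single q.2 hqnd p q.1
  simp only [decide_eq_true_eq]
  by_cases h : p ∈ q.2 <;> simp [h] at this ⊢ <;> exact this

theorem pv_where_keys_nodup (rings : List (List Int)) : (pvWhere rings).keys.Nodup := by
  rw [pv_where_eq_foldl]
  exact PySem.Dict.nodup_keys_foldl_modify_key (pvPlist rings) (fun pr : Int × Int => pr.1) []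
    (fun d pr l => l ++ [pr.2]) PySem.Dict.empty (by simp [PySem.Dict.keys_empty])

theorem pv_mem_keys (rings : List (List Int)) (p : Int) :
    p ∈ (pvWhere rings).keys ↔ ∃ r ∈ rings, p ∈ r := by
  rw [pv_where_eq_foldl]
  rw [PySem.Dict.keys_foldl_modify_key (pvPlist rings) (fun pr => pr.1) ([] : List Int)
      (fun d pr l => l ++ [pr.2]) PySem.Dict.empty]
  have hkeys : (PySem.Dict.empty : PySem.Dict Int (List Int)).keys = [] := by
    simp [PySem.Dict.keys_empty]
  rw [hkeys, PySem.Set.update_nil_left, PySem.Set.mem_ofList]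
  simp only [pvPlist, List.mem_map, List.mem_flatMap]
  constructor
  · rintro ⟨pr, ⟨q, hq, hpr⟩, rfl⟩
    obtain ⟨x, hx, hxeq⟩ := hpr
    obtain ⟨k, hk, hq2⟩ := (PySem.List.mem_enumerate_iff rings 0 q).mp hq
    rw [hq2] at hx hxeq
    rw [← hxeq]
    exact ⟨rings[k], List.getElem_mem hk, hx⟩
  · rintro ⟨r, hr, hp⟩
    obtain ⟨k, hk, rfl⟩ := List.getElem_of_mem hr
    refine ⟨(p, ((k : Int))), ⟨(((k : Int)), rings[k]), ?_, ?_⟩, rfl⟩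
    · exact (PySem.List.mem_enumerate_iff rings 0 _).mpr ⟨k, hk, by simp⟩
    · exact ⟨p, hp, rfl⟩

-- pvOcc facts
theorem pv_occ_mem (rings : List (List Int)) (p x : Int) :
    x ∈ pvOcc rings p ↔ ∃ k : Nat, k < rings.length ∧ p ∈ rings.getD k [] ∧ x = (k : Int) := by
  simp only [pvOcc, List.mem_map, List.mem_filter]
  constructor
  · rintro ⟨q, ⟨hq, hp⟩, rfl⟩
    obtain ⟨k, hk, hq2⟩ := (PySem.List.mem_enumerate_iff rings 0 q).mp hq
    rw [decide_eq_true_eq] at hp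
    rw [hq2] at hp ⊢
    refine ⟨k, hk, ?_, by simp⟩
    rw [pv_getD _ _ hk]
    exact hp
  · rintro ⟨k, hk, hp, rfl⟩
    refine ⟨(((k : Int)), rings[k]), ⟨(PySem.List.mem_enumerate_iff rings 0 _).mpr ⟨k, hk, by simp⟩, ?_⟩, rfl⟩
    rw [decide_eq_true_eq]
    rw [pv_getD _ _ hk] at hp
    exact hp

theorem pv_occ_pairwise (rings : List (List Int)) (p : Int) :
    (pvOcc rings p).Pairwise (· < ·) := by
  rw [pvOcc, List.pairwise_map]
  exact (PySem.List.pairwise_lt_enumerate rings 0).filter _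

-- membership in B's pair set
theorem pv_mem_pairs (rings : List (List Int)) (hnd : ∀ r ∈ rings, r.Nodup) (x : Int × Int) :
    x ∈ pvPairs rings ↔ x ∈ pvOvp rings := by
  have hmid : ∀ (idxs : List Int) (s' : PySem.Set (Int × Int)) (z : Int × Int),
      z ∈ (PySem.List.pyRange 0 (PySem.List.len idxs) 1).foldl
          (fun s' a => (PySem.List.pyRange (a + 1) (PySem.List.len idxs) 1).foldl
            (fun s'' b => PySem.Set.add s'' (PySem.List.pyGetD idxs a 0, PySem.List.pyGetD idxs b 0)) s') s' ↔
        z ∈ s' ∨ ∃ a b : Int, 0 ≤ a ∧ a + 1 ≤ b ∧ b < PySem.List.len idxs ∧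
          z = (PySem.List.pyGetD idxs a 0, PySem.List.pyGetD idxs b 0) := by
    intro idxs s' z
    rw [pv_mem_foldl_iff _
      (fun a z => ∃ b, ((a : Int) + 1 ≤ b ∧ b < PySem.List.len idxs) ∧
        z = (PySem.List.pyGetD idxs a 0, PySem.List.pyGetD idxs b 0))
      (fun s a z => by
        rw [pv_mem_foldl_iff _
          (fun b w => w = (PySem.List.pyGetD idxs a 0, PySem.List.pyGetD idxs b 0))
          (fun s'' b w => PySem.Set.mem_add _ _ _)]
        simp [PySem.List.mem_pyRange_one])]
    simp only [PySem.List.mem_pyRange_one]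
    constructor
    · rintro (h | ⟨a, ⟨ha0, halen⟩, b, ⟨hab, hblen⟩, hz⟩)
      · exact Or.inl h
      · exact Or.inr ⟨a, b, ha0, hab, hblen, hz⟩
    · rintro (h | ⟨a, b, ha0, hab, hblen, hz⟩)
      · exact Or.inl h
      · exact Or.inr ⟨a, ⟨ha0, by omega⟩, b, ⟨hab, hblen⟩, hz⟩
  have hchar : x ∈ pvPairs rings ↔
      ∃ idxs ∈ (pvWhere rings).values, ∃ a b : Int, 0 ≤ a ∧ a + 1 ≤ b ∧ b < PySem.List.len idxs ∧
        x = (PySem.List.pyGetD idxs a 0, PySem.List.pyGetD idxs b 0) := by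
    rw [pvPairs, pv_mem_foldl_iff _
      (fun idxs y => ∃ a b : Int, 0 ≤ a ∧ a + 1 ≤ b ∧ b < PySem.List.len idxs ∧
        y = (PySem.List.pyGetD idxs a 0, PySem.List.pyGetD idxs b 0))
      (fun s idxs y => hmid idxs s y)]
    simp [PySem.Set.empty]
  have hvals : ∀ idxs : List Int, idxs ∈ (pvWhere rings).values ↔
      ∃ p ∈ (pvWhere rings).keys, idxs = pvOcc rings p := by
    intro idxs
    rw [PySem.Dict.values_eq_map_keys _ (pv_where_keys_nodup rings) []]
    simp only [List.mem_map]
    constructor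
    · rintro ⟨p, hp, h⟩
      exact ⟨p, hp, by rw [← h, pv_where_getD rings hnd p]⟩
    · rintro ⟨p, hp, h⟩
      exact ⟨p, hp, by rw [h, ← pv_where_getD rings hnd p]⟩
  rw [hchar, pv_mem_ovp]
  constructor
  · rintro ⟨idxs, hidxs, a, b, ha0, hab, hblen, rfl⟩
    obtain ⟨p, hp, rfl⟩ := (hvals idxs).mp hidxs
    have hlen : PySem.List.len (pvOcc rings p) = ((pvOcc rings p).length : Int) := PySem.List.len_eq _
    rw [hlen] at hblen
    have hbu : b < ((pvOcc rings p).length : Int) := hblen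
    have hga : PySem.List.pyGetD (pvOcc rings p) a 0 = (pvOcc rings p)[a.toNat] :=
      PySem.List.pyGetD_eq_getElem _ 0 ha0 (by omega)
    have hgb : PySem.List.pyGetD (pvOcc rings p) b 0 = (pvOcc rings p)[b.toNat] :=
      PySem.List.pyGetD_eq_getElem _ 0 (by omega) (by omega)
    have hana : a.toNat < (pvOcc rings p).length := by omega
    have hbnb : b.toNat < (pvOcc rings p).length := by omega
    have hlt : (pvOcc rings p)[a.toNat] < (pvOcc rings p)[b.toNat] :=
      (List.pairwise_iff_getElem.mp (pv_occ_pairwise rings p)) a.toNat b.toNat hana hbnb (by omega)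
    obtain ⟨i, hin, hpi, hia⟩ := (pv_occ_mem rings p _).mp (List.getElem_mem hana)
    obtain ⟨j, hjn, hpj, hjb⟩ := (pv_occ_mem rings p _).mp (List.getElem_mem hbnb)
    refine ⟨i, j, ?_, hjn, (pv_ovb_iff rings i j).mpr ⟨p, hpi, hpj⟩, ?_⟩
    · rw [hia, hjb] at hlt
      exact_mod_cast hlt
    · rw [hga, hgb, hia, hjb]
  · rintro ⟨i, j, hij, hjn, hov, rfl⟩
    obtain ⟨p, hpi, hpj⟩ := (pv_ovb_iff rings i j).mp hov
    have hin : i < rings.length := lt_trans hij hjn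
    have hpkeys : p ∈ (pvWhere rings).keys := by
      rw [pv_mem_keys]
      refine ⟨rings[i], List.getElem_mem hin, ?_⟩
      rw [pv_getD _ _ hin] at hpi
      exact hpi
    have hmi : (i : Int) ∈ pvOcc rings p := (pv_occ_mem rings p _).mpr ⟨i, hin, hpi, rfl⟩
    have hmj : (j : Int) ∈ pvOcc rings p := (pv_occ_mem rings p _).mpr ⟨j, hjn, hpj, rfl⟩
    obtain ⟨a, han, hia⟩ := List.getElem_of_mem hmi
    obtain ⟨b, hbn, hjb⟩ := List.getElem_of_mem hmj
    have hab : a < b := by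
      rcases lt_trichotomy a b with h | h | h
      · exact h
      · exfalso
        subst h
        rw [hia] at hjb
        have : i = j := by exact_mod_cast hjb
        omega
      · exfalso
        have := (List.pairwise_iff_getElem.mp (pv_occ_pairwise rings p)) b a hbn han h
        rw [hia, hjb] at this
        have : (j : Nat) < i := by exact_mod_cast this
        omega
    refine ⟨pvOcc rings p, (hvals _).mpr ⟨p, hpkeys, rfl⟩, (a : Int), (b : Int),
      Int.natCast_nonneg a, by exact_mod_cast hab, ?_, ?_⟩
    · rw [PySem.List.len_eq]
      exact_mod_cast hbn
    · have h1 : PySem.List.pyGetD (pvOcc rings p) (a : Int) 0 = (pvOcc rings p)[a] := by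
        rw [PySem.List.pyGetD_eq_getElem _ 0 (Int.natCast_nonneg a) (by exact_mod_cast han)]
        simp
      have h2 : PySem.List.pyGetD (pvOcc rings p) (b : Int) 0 = (pvOcc rings p)[b] := by
        rw [PySem.List.pyGetD_eq_getElem _ 0 (Int.natCast_nonneg b) (by exact_mod_cast hbn)]
        simp
      rw [h1, h2, hia, hjb]

theorem pv_nodup_pairs (rings : List (List Int)) : (pvPairs rings).Nodup := by
  rw [pvPairs]
  apply pv_nodup_foldl
  · intro s idxs hs
    apply pv_nodup_foldl
    · intro s' a hs'
      apply pv_nodup_foldl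
      · intro s'' b hs''
        exact PySem.Set.nodup_add _ _ hs''
      · exact hs'
    · exact hs
  · exact List.nodup_nil

theorem pv_sorted2_eq_sorted_lex (xs : List (Int × Int)) :
    PySem.List.sorted2 xs (fun pr => pr.1) (fun pr => pr.2) false
      = PySem.List.sorted xs (fun pr => toLex (pr.1, pr.2)) false := by
  simp only [PySem.List.sorted2, PySem.List.sorted]
  congr 1
  funext acc x
  congr 1
  funext a b
  by_cases h1 : a.1 < b.1 <;> by_cases h2 : b.1 < a.1 <;> by_cases h3 : a.2 < b.2 <;>
    simp [h1, h2, h3, Prod.Lex.toLex_lt_toLex] <;> omega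

theorem pv_sorted_pairs (rings : List (List Int)) (hnd : ∀ r ∈ rings, r.Nodup) :
    PySem.List.sorted2 (pvPairs rings) (fun pr => pr.1) (fun pr => pr.2) false = pvOvp rings := by
  rw [pv_sorted2_eq_sorted_lex]
  apply PySem.List.sorted_eq_of_perm_of_pairwise_lt
  · exact (List.perm_ext_iff_of_nodup (pv_ovp_nodup rings) (pv_nodup_pairs rings)).mpr
      (fun a => (pv_mem_pairs rings hnd a).symm)
  · refine (pv_ovp_pairwise rings).imp ?_
    intro a b h
    rw [Prod.Lex.toLex_lt_toLex]
    exact h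

theorem pv_conn_iff (rings : List (List Int)) :
    pvConn rings = true ↔ ∀ i j : Nat, i < j → j < rings.length → pvOvb rings i j = false := by
  rw [pvConn, PySem.List.slice_to_neg_one]
  rw [List.all_eq_true]
  constructor
  · intro h i j hij hjn
    have hin : i < rings.dropLast.length := by
      rw [List.length_dropLast]
      omega
    have hmem : PySem.Set.isdisjoint (rings.getD i []) (rings.getD j []) ∈
        (PySem.List.enumerate rings.dropLast 0).flatMap
          (fun p => (PySem.List.slice rings (some (p.1 + 1)) none).map
            (fun ringj => PySem.Set.isdisjoint p.2 ringj)) := by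
      rw [List.mem_flatMap]
      refine ⟨((i : Int), rings.dropLast[i]), (PySem.List.mem_enumerate_iff _ 0 _).mpr ⟨i, hin, by simp⟩, ?_⟩
      rw [List.mem_map]
      refine ⟨rings.getD j [], ?_, ?_⟩
      · have hcast : ((i : Int) + 1) = ((i + 1 : Nat) : Int) := by push_cast; ring
        rw [hcast, PySem.List.slice_from_natCast]
        rw [List.mem_iff_getElem]
        refine ⟨j - (i + 1), by rw [List.length_drop]; omega, ?_⟩
        rw [List.getElem_drop, pv_getD _ _ hjn]
        congr 1
        omega
      · rw [List.getElem_dropLast, pv_getD _ _ (lt_trans hij hjn)]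
    have := h _ hmem
    rw [pvOvb, this]
    rfl
  · intro h b hb
    rw [List.mem_flatMap] at hb
    obtain ⟨p, hp, hbp⟩ := hb
    obtain ⟨k, hk, hpq⟩ := (PySem.List.mem_enumerate_iff _ 0 _).mp hp
    rw [List.mem_map] at hbp
    obtain ⟨rj, hrj, hbeq⟩ := hbp
    rw [hpq] at hrj hbeq
    simp only [zero_add] at hrj hbeq
    have hcast : ((k : Int) + 1) = ((k + 1 : Nat) : Int) := by push_cast; ring
    rw [hcast, PySem.List.slice_from_natCast] at hrj
    rw [List.mem_iff_getElem] at hrj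
    obtain ⟨m, hm, rfl⟩ := hrj
    rw [List.length_drop] at hm
    have hkn : k < rings.length - 1 := by
      rw [List.length_dropLast] at hk
      omega
    have hov := h k (k + 1 + m) (by omega) (by omega)
    have hov2 : PySem.Set.isdisjoint (rings.getD k []) (rings.getD (k + 1 + m) []) = true := by
      cases hX : PySem.Set.isdisjoint (rings.getD k []) (rings.getD (k + 1 + m) []) with
      | true => rfl
      | false =>
        rw [pvOvb, hX] at hov
        simp at hov
    rw [← hbeq]
    rw [List.getElem_dropLast, List.getElem_drop]
    rw [pv_getD _ _ (by omega : k < rings.length), pv_getD _ _ (by omega : k + 1 + m < rings.length)] at hov2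
    exact hov2

theorem pv_ovp_nil (rings : List (List Int)) :
    pvOvp rings = [] ↔ ∀ i j : Nat, i < j → j < rings.length → pvOvb rings i j = false := by
  rw [List.eq_nil_iff_forall_not_mem]
  constructor
  · intro h i j hij hjn
    cases hb : pvOvb rings i j with
    | false => rfl
    | true => exact absurd ((pv_mem_ovp rings _).mpr ⟨i, j, hij, hjn, hb, rfl⟩) (h _)
  · intro h x hx
    obtain ⟨i, j, hij, hjn, hov, rfl⟩ := (pv_mem_ovp rings x).mp hx
    rw [h i j hij hjn] at hov
    exact Bool.noConfusion hov

theorem pv_pairs_empty_iff (rings : List (List Int)) (hnd : ∀ r ∈ rings, r.Nodup) :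
    (pvPairs rings).isEmpty = true ↔ pvConn rings = true := by
  rw [List.isEmpty_iff, pv_conn_iff, ← pv_ovp_nil]
  constructor
  · intro h
    rw [List.eq_nil_iff_forall_not_mem]
    intro x hx
    have hx2 := (pv_mem_pairs rings hnd x).mpr hx
    rw [h] at hx2
    simp at hx2
  · intro h
    rw [List.eq_nil_iff_forall_not_mem]
    intro x hx
    have hx2 := (pv_mem_pairs rings hnd x).mp hx
    rw [h] at hx2
    simp at hx2

theorem pv_drop_eq (xs : List (List Int)) (m : Nat) :
    xs.drop m = (List.range (xs.length - m)).map (fun k => xs.getD (m + k) []) := by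
  apply List.ext_getElem
  · simp
  · intro k h1 h2
    rw [List.getElem_drop]
    rw [List.getElem_map, List.getElem_range]
    rw [pv_getD _ _ (by rw [List.length_drop] at h1; omega)]

theorem pv_inner (rings : List (List Int)) (i : Nat) (hi : i + 1 ≤ rings.length) :
    ((rings.drop (i + 1)).filter (fun rj => !(PySem.Set.isdisjoint (rings.getD i []) rj))).map
        (fun rj => PySem.Set.ofList (PySem.List.sorted (PySem.Set.union (rings.getD i []) rj) (fun x => x) false))
      = ((List.range rings.length).filter (fun j => decide (i < j) && pvOvb rings i j)).map
        (fun (j : Nat) => PySem.Set.ofList (pvU rings ((i : Int), (j : Int)))) := by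
  rw [pv_drop_eq, List.filter_map, List.map_map]
  rw [show List.range rings.length
        = List.range (i + 1) ++ (List.range (rings.length - (i + 1))).map (fun x => (i + 1) + x) from by
      rw [← List.range_add]; congr 1; omega]
  rw [List.filter_append, List.map_append]
  have h1 : (List.range (i + 1)).filter (fun j => decide (i < j) && pvOvb rings i j) = [] := by
    rw [List.filter_eq_nil_iff]
    intro j hj
    rw [List.mem_range] at hj
    simp only [Bool.and_eq_true, decide_eq_true_eq, not_and]
    intro h
    omega
  rw [h1, List.map_nil, List.nil_append, List.filter_map, List.map_map]
  rw [List.filter_congr (q := fun k => decide (i < (i + 1) + k) && pvOvb rings i ((i + 1) + k)) ?hpred]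
  case hpred =>
    intro k _
    simp only [Function.comp_apply, pvOvb]
    have hd : decide (i < (i + 1) + k) = true := by
      rw [decide_eq_true_eq]
      omega
    rw [hd, Bool.true_and]
  apply List.map_congr_left
  intro k hk
  simp only [Function.comp_apply, pvU, PySem.List.pyGetD_natCast]

theorem pv_new_eq (rings : List (List Int)) :
    pvNew rings = (pvOvp rings).map (fun pr => PySem.Set.ofList (pvU rings pr)) := by
  have hR : (pvOvp rings).map (fun pr => PySem.Set.ofList (pvU rings pr))
      = (List.range rings.length).flatMap (fun i =>
          ((List.range rings.length).filter (fun j => decide (i < j) && pvOvb rings i j)).map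
            (fun (j : Nat) => PySem.Set.ofList (pvU rings ((i : Int), (j : Int))))) := by
    rw [pvOvp, List.map_flatMap]
    apply List.flatMap_congr
    intro i _
    rw [List.map_map]
    rfl
  rw [hR]
  rcases Nat.eq_zero_or_pos rings.length with hn0 | hnpos
  · rw [List.eq_nil_of_length_eq_zero hn0]
    rfl
  rw [pvNew, PySem.List.slice_to_neg_one]
  rw [PySem.List.enumerate_eq_map_pyRange _ ([] : List Int)]
  have hlen : PySem.List.len rings.dropLast = ((rings.length - 1 : Nat) : Int) := by
    rw [PySem.List.len_eq, List.length_dropLast]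
  rw [hlen, PySem.List.pyRange_zero_nat, List.flatMap_map, List.flatMap_map]
  rw [show List.range rings.length = List.range (rings.length - 1) ++ [rings.length - 1] from by
    rw [← List.range_succ]; congr 1; omega]
  rw [List.flatMap_append]
  have hlast : (List.flatMap (fun (i : Nat) =>
      ((List.range (rings.length - 1) ++ [rings.length - 1]).filter
          (fun j => decide (i < j) && pvOvb rings i j)).map
        (fun (j : Nat) => PySem.Set.ofList (pvU rings ((i : Int), (j : Int)))))
      [rings.length - 1]) = [] := by
    rw [List.flatMap_cons, List.flatMap_nil, List.append_nil]
    rw [List.filter_eq_nil_iff.mpr, List.map_nil]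
    intro j hj
    rw [List.mem_append, List.mem_range] at hj
    simp only [Bool.and_eq_true, decide_eq_true_eq, not_and]
    intro h
    rcases hj with hj | hj
    · omega
    · rw [List.mem_singleton.mp hj] at h
      omega
  rw [hlast, List.append_nil]
  apply List.flatMap_congr
  intro k hk
  rw [List.mem_range] at hk
  dsimp only
  have hgd : PySem.List.pyGetD rings.dropLast ((k : Int)) [] = rings.getD k [] := by
    rw [PySem.List.pyGetD_natCast]
    rw [pv_getD _ _ (by rw [List.length_dropLast]; omega), pv_getD _ _ (by omega), List.getElem_dropLast]
  have hcast : ((k : Int) + 1) = ((k + 1 : Nat) : Int) := by push_cast; ring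
  rw [hgd, hcast, PySem.List.slice_from_natCast]
  rw [show (List.range (rings.length - 1) ++ [rings.length - 1]) = List.range rings.length from by
    rw [← List.range_succ]; congr 1; omega]
  exact pv_inner rings k (by omega)

theorem pv_le_nodup_lt (l : List Int) (hle : l.Pairwise (· ≤ ·)) (hnd : l.Nodup) :
    l.Pairwise (· < ·) := by
  have := List.pairwise_and_iff.mpr ⟨hle, hnd⟩
  exact this.imp (fun h => lt_of_le_of_ne h.1 h.2)

theorem pv_pyGetD_nodup (rings : List (List Int)) (hnd : ∀ r ∈ rings, r.Nodup) (i : Int) :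
    (PySem.List.pyGetD rings i []).Nodup := by
  by_cases h : PySem.Raise.InRange rings.length i
  · exact hnd _ (PySem.List.pyGetD_mem rings [] h)
  · have hnone : PySem.List.pyGet? rings i = none := (PySem.List.pyGet?_eq_none_iff rings i).mpr h
    have : PySem.List.pyGetD rings i [] = [] := by
      simp [PySem.List.pyGetD, hnone]
    rw [this]
    exact List.nodup_nil

theorem pv_U_pairwise (rings : List (List Int)) (hnd : ∀ r ∈ rings, r.Nodup) (pr : Int × Int) :
    (pvU rings pr).Pairwise (· < ·) := by
  rw [pvU]
  apply pv_le_nodup_lt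
  · exact PySem.List.sorted_pairwise _ _
  · exact ((PySem.List.sorted_perm _ _ _).nodup_iff).mpr
      (PySem.Set.nodup_union _ _ (pv_pyGetD_nodup rings hnd pr.1))

theorem pv_merge_fold (rings : List (List Int)) (hnd : ∀ r ∈ rings, r.Nodup)
    (l : List (Int × Int)) (conj : List (List Int)) (mem : PySem.Set Int)
    (hconj : ∀ c ∈ conj, c.Pairwise (· < ·))
    (hmem : ∀ x : Int, x ∈ mem ↔ ∃ c ∈ conj, x ∈ c) :
    (l.foldl (pvStepB rings) (conj, conj, mem)).1
        = (l.map (fun pr => PySem.Set.ofList (pvU rings pr))).foldl pvStepD conj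
      ∧ (∀ x : Int, x ∈ (l.foldl (pvStepB rings) (conj, conj, mem)).2.2
          ↔ ∃ c ∈ (l.foldl (pvStepB rings) (conj, conj, mem)).1, x ∈ c)
      ∧ (∀ c ∈ (l.foldl (pvStepB rings) (conj, conj, mem)).1, c.Pairwise (· < ·)) := by
  induction l generalizing conj mem with
  | nil => exact ⟨rfl, hmem, hconj⟩
  | cons pr t ih =>
    simp only [List.foldl_cons, List.map_cons]
    have hupw : (pvU rings pr).Pairwise (· < ·) := pv_U_pairwise rings hnd pr
    have hund : (pvU rings pr).Nodup := pv_pairwise_lt_nodup _ hupw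
    have hofl : PySem.Set.ofList (pvU rings pr) = pvU rings pr :=
      PySem.Set.ofList_eq_self_of_nodup _ hund
    have hcond : (conj.any (fun c => PySem.Set.equal c (PySem.Set.ofList (pvU rings pr))) = true)
        ↔ (PySem.Set.contains conj (pvU rings pr) = true) := by
      rw [hofl, List.any_eq_true, PySem.Set.contains_iff]
      constructor
      · rintro ⟨c, hc, heq⟩
        have := pv_strict_eq c _ (hconj c hc) hupw (fun x => (PySem.Set.equal_iff c _).mp heq x)
        rw [← this]
        exact hc
      · intro hu
        exact ⟨_, hu, (PySem.Set.equal_iff _ _).mpr (fun x => Iff.rfl)⟩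
    have hstepB : pvStepB rings (conj, conj, mem) pr =
        if PySem.Set.contains conj (pvU rings pr) then (conj, conj, mem)
        else (conj ++ [PySem.Set.ofList (pvU rings pr)], PySem.Set.add conj (pvU rings pr),
              PySem.Set.update mem (pvU rings pr)) := rfl
    have hstepD : pvStepD conj (PySem.Set.ofList (pvU rings pr)) =
        if conj.any (fun c => PySem.Set.equal c (PySem.Set.ofList (pvU rings pr))) then conj
        else conj ++ [PySem.Set.ofList (pvU rings pr)] := rfl
    rw [hstepB, hstepD]
    by_cases hin : PySem.Set.contains conj (pvU rings pr) = true
    · rw [if_pos hin, if_pos (hcond.mpr hin)]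
      exact ih conj mem hconj hmem
    · rw [if_neg hin, if_neg (fun h => hin (hcond.mp h))]
      have hnotmem : pvU rings pr ∉ conj := fun h => hin ((PySem.Set.contains_iff _ _).mpr h)
      rw [hofl, PySem.Set.add_of_not_mem hnotmem]
      refine ih (conj ++ [pvU rings pr]) _ ?_ ?_
      · intro c hc
        rcases List.mem_append.mp hc with h | h
        · exact hconj c h
        · rw [List.mem_singleton.mp h]
          exact hupw
      · intro x
        rw [PySem.Set.mem_update]
        constructor
        · rintro (h | h)
          · obtain ⟨c, hc, hx⟩ := (hmem x).mp h
            exact ⟨c, List.mem_append_left _ hc, hx⟩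
          · exact ⟨_, List.mem_append_right _ (List.mem_singleton_self _), h⟩
        · rintro ⟨c, hc, hx⟩
          rcases List.mem_append.mp hc with h | h
          · exact Or.inl ((hmem x).mpr ⟨c, h, hx⟩)
          · rw [List.mem_singleton.mp h] at hx
            exact Or.inr hx

theorem pv_fin_fold (l : List (List Int)) (hl : ∀ r ∈ l, r.Nodup)
    (conj : List (List Int)) (mem : PySem.Set Int)
    (hconj : ∀ c ∈ conj, c.Pairwise (· < ·))
    (hmem : ∀ x : Int, x ∈ mem ↔ ∃ c ∈ conj, x ∈ c) :
    (l.foldl pvStepC (conj, mem)).1 = l.foldl pvStepE conj := by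
  induction l generalizing conj mem with
  | nil => rfl
  | cons r t ih =>
    simp only [List.foldl_cons]
    have hrnd : r.Nodup := hl r List.mem_cons_self
    have htl : ∀ x ∈ t, x.Nodup := fun x hx => hl x (List.mem_cons_of_mem _ hx)
    have hAll : ((conj.map (fun j => PySem.Set.isdisjoint r j)).all (fun b => b) = true)
        ↔ ∀ c ∈ conj, ∀ x ∈ r, x ∉ c := by
      rw [List.all_eq_true]
      constructor
      · intro h c hc x hxr hxc
        have := h _ (List.mem_map_of_mem hc)
        exact (PySem.Set.isdisjoint_iff r c).mp this x hxr hxc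
      · intro h b hb
        obtain ⟨c, hc, rfl⟩ := List.mem_map.mp hb
        exact (PySem.Set.isdisjoint_iff r c).mpr (fun x hx => h c hc x hx)
    have hB : (PySem.Set.isdisjoint mem r = true) ↔ ∀ c ∈ conj, ∀ x ∈ r, x ∉ c := by
      rw [PySem.Set.isdisjoint_iff]
      constructor
      · intro h c hc x hxr hxc
        exact h x ((hmem x).mpr ⟨c, hc, hxc⟩) hxr
      · intro h x hxm hxr
        obtain ⟨c, hc, hxc⟩ := (hmem x).mp hxm
        exact h c hc x hxr hxc
    have hstepC : pvStepC (conj, mem) r =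
        if PySem.Set.isdisjoint mem r then
          (conj ++ [PySem.Set.ofList (PySem.List.sorted r (fun x => x) false)], PySem.Set.update mem r)
        else (conj, mem) := rfl
    have hstepE : pvStepE conj r =
        if (conj.map (fun j => PySem.Set.isdisjoint r j)).all (fun b => b) then
          conj ++ [PySem.Set.ofList (PySem.List.sorted r (fun x => x) false)]
        else conj := rfl
    rw [hstepC, hstepE]
    have hsnd : (PySem.List.sorted r (fun x => x) false).Nodup :=
      ((PySem.List.sorted_perm _ _ _).nodup_iff).mpr hrnd
    have hofl : PySem.Set.ofList (PySem.List.sorted r (fun x => x) false)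
        = PySem.List.sorted r (fun x => x) false :=
      PySem.Set.ofList_eq_self_of_nodup _ hsnd
    by_cases h : ∀ c ∈ conj, ∀ x ∈ r, x ∉ c
    · rw [if_pos (hB.mpr h), if_pos (hAll.mpr h)]
      refine ih htl _ _ ?_ ?_
      · intro c hc
        rcases List.mem_append.mp hc with hh | hh
        · exact hconj c hh
        · rw [List.mem_singleton.mp hh, hofl]
          exact pv_le_nodup_lt _ (PySem.List.sorted_pairwise _ _) hsnd
      · intro x
        rw [PySem.Set.mem_update]
        constructor
        · rintro (hh | hh)
          · obtain ⟨c, hc, hx⟩ := (hmem x).mp hh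
            exact ⟨c, List.mem_append_left _ hc, hx⟩
          · refine ⟨_, List.mem_append_right _ (List.mem_singleton_self _), ?_⟩
            rw [hofl, PySem.List.mem_sorted]
            exact hh
        · rintro ⟨c, hc, hx⟩
          rcases List.mem_append.mp hc with hh | hh
          · exact Or.inl ((hmem x).mpr ⟨c, hh, hx⟩)
          · rw [List.mem_singleton.mp hh, hofl, PySem.List.mem_sorted] at hx
            exact Or.inr hx
    · rw [if_neg (fun hh => h (hB.mp hh)), if_neg (fun hh => h (hAll.mp hh))]
      exact ih htl _ _ hconj hmem

-- ===== VERDICT (by name: the statement is the Claim_ definition above) =====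
theorem check_rings_py_spec : Claim_equal_check_rings_py := by
  intro rings _ hpre
  unfold Spec_check_rings_py
  rw [pv_a_eq, pv_b_eq]
  by_cases hc : pvConn rings = true
  · rw [hc]
    rw [if_neg (show ¬((!true) = true) by simp)]
    rw [if_pos ((pv_pairs_empty_iff rings hpre).mpr hc)]
  · have hcf : pvConn rings = false := by
      cases h : pvConn rings with
      | false => rfl
      | true => exact absurd h hc
    have hne : ¬((pvPairs rings).isEmpty = true) := fun h =>
      hc ((pv_pairs_empty_iff rings hpre).mp h)
    rw [hcf]
    rw [if_pos (show (!false) = true by rfl)]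
    rw [if_neg hne]
    have hM : pvMerge rings = (pvOvp rings).foldl (pvStepB rings) ([], [], []) := by
      rw [pvMerge, pv_sorted_pairs rings hpre]
      rfl
    obtain ⟨h1, h3, h4⟩ := pv_merge_fold rings hpre (pvOvp rings) [] [] (by simp) (by simp)
    rw [Prod.mk.injEq]
    refine ⟨?_, rfl⟩
    rw [hM]
    rw [pv_fin_fold rings hpre _ _ h4 h3]
    rw [pv_new_eq, h1]
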